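-- pv_equiv track=rewrite | github.com/Core12-Automation/DispatchAgent | General_Ticket_Report_Final.py | canonical_company_name
-- ===== SOURCE A (Python) =====
-- from typing import Any, Dict, Iterable, List, Optional, Tuple
--
-- COMPANY_ALIASES: Dict[str, List[str]] = {
--     "A3 Architecture": ["A3", "janderson@a3-architecture.com"],
--     "Ajay SQM Group": ["Ajay", "ajay", "AJAY", "SQM", "beau.routh@ajay-sqm.com"],
--     "Allergy and Asthma ": ["Allergy", "Asthma"],
--     "Andrew Akard Architecture": ["Andrew Akard", "andy.akard@akardarchitecture.com"],
--     "Atkins Park Restaurant": ["Atkins Park", "ehowell@atkinspark.com"],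
--     "BLUR Workshop": ["blur", "blurworkshop", "blur workshop", "blurworkshop.com", "jaredd@blurworkshop.com"],
--     "Business Environments": ["Business Environments", "chettler@becusacorp.com"],
--     "CFC Group": ["CFC", "tclose@cfcgroupinc.com"],
--     "Commodity Cables": ["commoditycables", "commodity cable", "commoditycables.com"],
--     "Gather Grills": ["Gather Grills", "jed@strangefarms.com"],
--     "HPD Consulting Engineers": ["HPD", "kmaddox@hpdengineers.com"],
--     "Legacy Golf Links": ["Legacy Golf", "LGL", "EZsuite", "robert.sabat@legacyfoxcreek.com"],
--     "Mann Mechanical": ["Mann Mechanical", "gthomas@mannmechanical.com"],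
--     "Milestone Dentistry": ["Milestone Dentistry", "docwake@milestone-dentistry.com"],
--     "Museum of Design Atlanta": ["Museum of Design", "MODA", "lflusche@museumofdesign.org"],
--     "Purisolve": ["Purisolve", "wallace.jones@purisolve.com"],
--     "Providence Baptist Church": ["Providence Baptist Church", "Providence Church", "Providence Baptist", "agenus@providencebc.com"],
--     "Savant Engineering": ["Savant Engineering", "Savant", "janderson@savanteng.com"],
--     "Shepherd Harvey": ["Shepherd Harvey", "sshepherd@shepharv.com"],
--     "Sizemore Group": ["Sizemore", "angelitaa@sizemoregroup.com", "monicap@sizemoregroup.com"],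
--     "St Bartholomews Episcopal": ["St Bartholomews", "Bartholomews Episcopal", "barry@barrybynum.com"],
--     "The Church at Chapel Hill": ["Chapel Hill", "andy.odonnell@chapelhill.cc"],
--     "Whitaker Company": ["Whitaker", "daniel.craven@whitaker.company"],
--     "Willmer Engineering, Inc.": ["Willmer", "jcwillmer@willmerengineering.com"],
-- }
--
-- def norm(s: str) -> str:
--     return "".join(ch.lower() for ch in (s or "").strip())
--
-- def match_any_loose(value: str, patterns: Iterable[str]) -> bool:
--     v = norm(value)
--     if not v:
--         return False
--     for p in patterns:
--         p2 = norm(p)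
--         if p2 and p2 in v:
--             return True
--     return False
--
-- def canonical_company_name(company_name: str, company_identifier: str) -> str:
--     cn = company_name.strip() if company_name else ""
--     ci = company_identifier.strip() if company_identifier else ""
--
--     for canonical, aliases in COMPANY_ALIASES.items():
--         if match_any_loose(cn, [canonical]) or match_any_loose(ci, [canonical]):
--             return canonical
--
--     hay = " | ".join([cn, ci])
--     for canonical, aliases in COMPANY_ALIASES.items():
--         if match_any_loose(hay, [canonical] + aliases):
--             return canonical
--
--     return cn or ci or "Unknown"
-- ===== SOURCE B (Python) =====
-- from typing import Dict, List
--
-- COMPANY_ALIASES: Dict[str, List[str]] = {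
--     "A3 Architecture": ["A3", "janderson@a3-architecture.com"],
--     "Ajay SQM Group": ["Ajay", "ajay", "AJAY", "SQM", "beau.routh@ajay-sqm.com"],
--     "Allergy and Asthma ": ["Allergy", "Asthma"],
--     "Andrew Akard Architecture": ["Andrew Akard", "andy.akard@akardarchitecture.com"],
--     "Atkins Park Restaurant": ["Atkins Park", "ehowell@atkinspark.com"],
--     "BLUR Workshop": ["blur", "blurworkshop", "blur workshop", "blurworkshop.com", "jaredd@blurworkshop.com"],
--     "Business Environments": ["Business Environments", "chettler@becusacorp.com"],
--     "CFC Group": ["CFC", "tclose@cfcgroupinc.com"],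
--     "Commodity Cables": ["commoditycables", "commodity cable", "commoditycables.com"],
--     "Gather Grills": ["Gather Grills", "jed@strangefarms.com"],
--     "HPD Consulting Engineers": ["HPD", "kmaddox@hpdengineers.com"],
--     "Legacy Golf Links": ["Legacy Golf", "LGL", "EZsuite", "robert.sabat@legacyfoxcreek.com"],
--     "Mann Mechanical": ["Mann Mechanical", "gthomas@mannmechanical.com"],
--     "Milestone Dentistry": ["Milestone Dentistry", "docwake@milestone-dentistry.com"],
--     "Museum of Design Atlanta": ["Museum of Design", "MODA", "lflusche@museumofdesign.org"],
--     "Purisolve": ["Purisolve", "wallace.jones@purisolve.com"],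
--     "Providence Baptist Church": ["Providence Baptist Church", "Providence Church", "Providence Baptist", "agenus@providencebc.com"],
--     "Savant Engineering": ["Savant Engineering", "Savant", "janderson@savanteng.com"],
--     "Shepherd Harvey": ["Shepherd Harvey", "sshepherd@shepharv.com"],
--     "Sizemore Group": ["Sizemore", "angelitaa@sizemoregroup.com", "monicap@sizemoregroup.com"],
--     "St Bartholomews Episcopal": ["St Bartholomews", "Bartholomews Episcopal", "barry@barrybynum.com"],
--     "The Church at Chapel Hill": ["Chapel Hill", "andy.odonnell@chapelhill.cc"],
--     "Whitaker Company": ["Whitaker", "daniel.craven@whitaker.company"],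
--     "Willmer Engineering, Inc.": ["Willmer", "jcwillmer@willmerengineering.com"],
-- }
--
-- def _norm(s: str) -> str:
--     return "".join(ch.lower() for ch in (s or "").strip())
--
-- def canonical_company_name(company_name: str, company_identifier: str) -> str:
--     cn = company_name.strip() if company_name else ""
--     ci = company_identifier.strip() if company_identifier else ""
--     ncn = _norm(cn)
--     nci = _norm(ci)
--     hay = _norm(" | ".join([cn, ci]))
--
--     best = None  # first company matched only through the loose (tier-1) test
--     for canonical, aliases in COMPANY_ALIASES.items():
--         c = _norm(canonical)
--         # tier 0: canonical name inside the (normalized) name or identifier alone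
--         if c and ((ncn and c in ncn) or (nci and c in nci)):
--             return canonical
--         # tier 1: canonical or any alias inside the normalized combined haystack
--         if best is None and hay and any(
--             (p2 := _norm(p)) and p2 in hay for p in [canonical] + aliases
--         ):
--             best = canonical
--     if best is not None:
--         return best
--     return cn or ci or "Unknown"
-- ===== Notes on version B (the rewrite author's own statement) =====
-- stated objective: faster
-- what changed: Replaced A's two sequential full scans of COMPANY_ALIASES by a single pass that returns immediately on a tier-0 (canonical-in-name/identifier) match and remembers the first tier-1 (loose alias) match in an accumulator; the inputs and the haystack are normalized once up front instead of being re-normalized inside every match_any_loose call.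
import Mathlib
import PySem

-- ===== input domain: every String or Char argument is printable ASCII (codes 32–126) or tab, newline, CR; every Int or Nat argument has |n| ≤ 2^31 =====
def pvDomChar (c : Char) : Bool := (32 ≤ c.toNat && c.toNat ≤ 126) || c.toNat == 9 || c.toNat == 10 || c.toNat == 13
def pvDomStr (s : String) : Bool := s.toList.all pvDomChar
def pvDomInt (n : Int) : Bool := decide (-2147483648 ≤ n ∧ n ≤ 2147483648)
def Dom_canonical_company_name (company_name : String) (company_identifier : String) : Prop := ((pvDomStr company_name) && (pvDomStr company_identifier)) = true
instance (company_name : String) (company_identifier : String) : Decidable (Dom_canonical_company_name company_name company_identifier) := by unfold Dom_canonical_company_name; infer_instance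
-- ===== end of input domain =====

-- B collapses A's two sequential scans of COMPANY_ALIASES into one pass with an
-- accumulator for the first loose (tier-1) match; same return value everywhere.

-- ===== PORT A =====

-- COMPANY_ALIASES as an insertion-ordered association list
def COMPANY_ALIASES : List (String × List String) :=
  [("A3 Architecture", ["A3", "janderson@a3-architecture.com"]),
   ("Ajay SQM Group", ["Ajay", "ajay", "AJAY", "SQM", "beau.routh@ajay-sqm.com"]),
   ("Allergy and Asthma ", ["Allergy", "Asthma"]),
   ("Andrew Akard Architecture", ["Andrew Akard", "andy.akard@akardarchitecture.com"]),
   ("Atkins Park Restaurant", ["Atkins Park", "ehowell@atkinspark.com"]),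
   ("BLUR Workshop", ["blur", "blurworkshop", "blur workshop", "blurworkshop.com", "jaredd@blurworkshop.com"]),
   ("Business Environments", ["Business Environments", "chettler@becusacorp.com"]),
   ("CFC Group", ["CFC", "tclose@cfcgroupinc.com"]),
   ("Commodity Cables", ["commoditycables", "commodity cable", "commoditycables.com"]),
   ("Gather Grills", ["Gather Grills", "jed@strangefarms.com"]),
   ("HPD Consulting Engineers", ["HPD", "kmaddox@hpdengineers.com"]),
   ("Legacy Golf Links", ["Legacy Golf", "LGL", "EZsuite", "robert.sabat@legacyfoxcreek.com"]),
   ("Mann Mechanical", ["Mann Mechanical", "gthomas@mannmechanical.com"]),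
   ("Milestone Dentistry", ["Milestone Dentistry", "docwake@milestone-dentistry.com"]),
   ("Museum of Design Atlanta", ["Museum of Design", "MODA", "lflusche@museumofdesign.org"]),
   ("Purisolve", ["Purisolve", "wallace.jones@purisolve.com"]),
   ("Providence Baptist Church", ["Providence Baptist Church", "Providence Church", "Providence Baptist", "agenus@providencebc.com"]),
   ("Savant Engineering", ["Savant Engineering", "Savant", "janderson@savanteng.com"]),
   ("Shepherd Harvey", ["Shepherd Harvey", "sshepherd@shepharv.com"]),
   ("Sizemore Group", ["Sizemore", "angelitaa@sizemoregroup.com", "monicap@sizemoregroup.com"]),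
   ("St Bartholomews Episcopal", ["St Bartholomews", "Bartholomews Episcopal", "barry@barrybynum.com"]),
   ("The Church at Chapel Hill", ["Chapel Hill", "andy.odonnell@chapelhill.cc"]),
   ("Whitaker Company", ["Whitaker", "daniel.craven@whitaker.company"]),
   ("Willmer Engineering, Inc.", ["Willmer", "jcwillmer@willmerengineering.com"])]

-- norm(s) = "".join(ch.lower() for ch in (s or "").strip())
def pvNorm (s : String) : String :=
  String.ofList (((PySem.Str.strip s).toList).map PySem.Chars.lowerChar)

-- match_any_loose(value, patterns)
def match_any_loose (value : String) (patterns : List String) : Bool :=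
  let v := pvNorm value
  if v = "" then false
  else patterns.any (fun p => let p2 := pvNorm p; decide (p2 ≠ "") && PySem.Str.isIn p2 v)

def canonical_company_name (company_name : String) (company_identifier : String) : String :=
  let cn := if company_name ≠ "" then PySem.Str.strip company_name else ""
  let ci := if company_identifier ≠ "" then PySem.Str.strip company_identifier else ""
  -- first loop: return the first canonical with a tier-0 match
  match COMPANY_ALIASES.find? (fun e => match_any_loose cn [e.1] || match_any_loose ci [e.1]) with
  | some e => e.1
  | none =>
    let hay := PySem.Str.join " | " [cn, ci]
    -- second loop: return the first canonical with a loose match on the haystack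
    match COMPANY_ALIASES.find? (fun e => match_any_loose hay (e.1 :: e.2)) with
    | some e => e.1
    | none => if cn ≠ "" then cn else if ci ≠ "" then ci else "Unknown"

-- ===== PORT B =====

-- the single pass of Source B: early return on tier 0, 'best' remembers the first tier-1 match
def pvAltLoop (ncn nci hay : String) (best : Option String) :
    List (String × List String) → Option String
  | [] => best
  | (canonical, aliases) :: rest =>
    let c := pvNorm canonical
    if decide (c ≠ "") &&
        ((decide (ncn ≠ "") && PySem.Str.isIn c ncn) ||
         (decide (nci ≠ "") && PySem.Str.isIn c nci)) then
      some canonical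
    else
      let best' :=
        if best.isNone && decide (hay ≠ "") &&
            ((canonical :: aliases).any (fun p =>
              let p2 := pvNorm p; decide (p2 ≠ "") && PySem.Str.isIn p2 hay)) then
          some canonical
        else best
      pvAltLoop ncn nci hay best' rest

def canonical_company_name_alt (company_name : String) (company_identifier : String) : String :=
  let cn := if company_name ≠ "" then PySem.Str.strip company_name else ""
  let ci := if company_identifier ≠ "" then PySem.Str.strip company_identifier else ""
  let ncn := pvNorm cn
  let nci := pvNorm ci
  let hay := pvNorm (PySem.Str.join " | " [cn, ci])
  match pvAltLoop ncn nci hay none COMPANY_ALIASES with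
  | some c => c
  | none => if cn ≠ "" then cn else if ci ≠ "" then ci else "Unknown"

-- ===== PRECONDITION & SPEC =====
def Spec_canonical_company_name (company_name : String) (company_identifier : String) (out : String) : Prop := out = canonical_company_name_alt company_name company_identifier
instance (company_name : String) (company_identifier : String) (out : String) : Decidable (Spec_canonical_company_name company_name company_identifier out) := by unfold Spec_canonical_company_name; infer_instance

-- ===== CLAIM (what is proved, stated in full; the proofs are below) =====
def Claim_equal_canonical_company_name : Prop := ∀ (company_name : String) (company_identifier : String), Dom_canonical_company_name company_name company_identifier → Spec_canonical_company_name company_name company_identifier (canonical_company_name company_name company_identifier)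

-- ===== LEMMAS AND PROOFS =====

-- B's tier-0 test coincides with A's first-loop predicate
lemma tier0_eq (cn ci can : String) :
    (decide (pvNorm can ≠ "") &&
      ((decide (pvNorm cn ≠ "") && PySem.Str.isIn (pvNorm can) (pvNorm cn)) ||
       (decide (pvNorm ci ≠ "") && PySem.Str.isIn (pvNorm can) (pvNorm ci))))
    = (match_any_loose cn [can] || match_any_loose ci [can]) := by
  unfold match_any_loose
  by_cases h1 : pvNorm cn = "" <;> by_cases h2 : pvNorm ci = "" <;>
    by_cases h3 : pvNorm can = "" <;>
      simp [h1, h2, h3, Bool.and_or_distrib_left]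

-- B's tier-1 test coincides with A's second-loop predicate
lemma tier1_eq (hay can : String) (aliases : List String) :
    (decide (pvNorm hay ≠ "") &&
      ((can :: aliases).any (fun p =>
        let p2 := pvNorm p; decide (p2 ≠ "") && PySem.Str.isIn p2 (pvNorm hay))))
    = match_any_loose hay (can :: aliases) := by
  unfold match_any_loose
  by_cases h : pvNorm hay = "" <;> simp [h]

-- once 'best' is set, only a tier-0 hit can change the outcome
lemma pvAltLoop_some (ncn nci hay b : String) (l : List (String × List String)) :
    pvAltLoop ncn nci hay (some b) l =
      match l.find? (fun e =>
          decide (pvNorm e.1 ≠ "") &&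
            ((decide (ncn ≠ "") && PySem.Str.isIn (pvNorm e.1) ncn) ||
             (decide (nci ≠ "") && PySem.Str.isIn (pvNorm e.1) nci))) with
      | some e => some e.1
      | none => some b := by
  induction l with
  | nil => rfl
  | cons e rest ih =>
    obtain ⟨canonical, aliases⟩ := e
    simp only [pvAltLoop]
    by_cases h0 : (decide (pvNorm canonical ≠ "") &&
        ((decide (ncn ≠ "") && PySem.Str.isIn (pvNorm canonical) ncn) ||
         (decide (nci ≠ "") && PySem.Str.isIn (pvNorm canonical) nci))) = true
    · rw [if_pos h0, List.find?_cons_of_pos (by exact h0)]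
    · rw [if_neg h0, List.find?_cons_of_neg (by exact h0)]
      simp only [Option.isNone_some, Bool.false_and, Bool.false_eq_true, if_false]
      exact ih

-- the single pass equals: first tier-0 hit, else first tier-1 hit (as a canonical name)
lemma pvAltLoop_none (ncn nci hay : String) (l : List (String × List String)) :
    pvAltLoop ncn nci hay none l =
      match l.find? (fun e =>
          decide (pvNorm e.1 ≠ "") &&
            ((decide (ncn ≠ "") && PySem.Str.isIn (pvNorm e.1) ncn) ||
             (decide (nci ≠ "") && PySem.Str.isIn (pvNorm e.1) nci))) with
      | some e => some e.1
      | none =>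
        (l.find? (fun e =>
          decide (hay ≠ "") &&
            ((e.1 :: e.2).any (fun p =>
              let p2 := pvNorm p; decide (p2 ≠ "") && PySem.Str.isIn p2 hay)))).map (·.1) := by
  induction l with
  | nil => rfl
  | cons e rest ih =>
    obtain ⟨canonical, aliases⟩ := e
    simp only [pvAltLoop]
    by_cases h0 : (decide (pvNorm canonical ≠ "") &&
        ((decide (ncn ≠ "") && PySem.Str.isIn (pvNorm canonical) ncn) ||
         (decide (nci ≠ "") && PySem.Str.isIn (pvNorm canonical) nci))) = true
    · rw [if_pos h0, List.find?_cons_of_pos (by exact h0)]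
    · rw [if_neg h0, List.find?_cons_of_neg (by exact h0)]
      simp only [Option.isNone_none, Bool.true_and]
      by_cases h1 : (decide (hay ≠ "") &&
          ((canonical :: aliases).any (fun p =>
            let p2 := pvNorm p; decide (p2 ≠ "") && PySem.Str.isIn p2 hay))) = true
      · rw [if_pos h1, List.find?_cons_of_pos (by exact h1), pvAltLoop_some]
        cases List.find? (fun e =>
            decide (pvNorm e.1 ≠ "") &&
              ((decide (ncn ≠ "") && PySem.Str.isIn (pvNorm e.1) ncn) ||
               (decide (nci ≠ "") && PySem.Str.isIn (pvNorm e.1) nci))) rest <;> rfl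
      · rw [if_neg h1, List.find?_cons_of_neg (by exact h1)]
        exact ih

-- ===== VERDICT (by name: the statement is the Claim_ definition above) =====
theorem canonical_company_name_spec : Claim_equal_canonical_company_name := by
  intro company_name company_identifier _
  simp only [Spec_canonical_company_name, canonical_company_name, canonical_company_name_alt]
  rw [pvAltLoop_none]
  have h0 : (fun e : String × List String =>
      decide (pvNorm e.1 ≠ "") &&
        ((decide (pvNorm (if company_name ≠ "" then PySem.Str.strip company_name else "") ≠ "") &&
            PySem.Str.isIn (pvNorm e.1) (pvNorm (if company_name ≠ "" then PySem.Str.strip company_name else ""))) ||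
         (decide (pvNorm (if company_identifier ≠ "" then PySem.Str.strip company_identifier else "") ≠ "") &&
            PySem.Str.isIn (pvNorm e.1) (pvNorm (if company_identifier ≠ "" then PySem.Str.strip company_identifier else ""))))) =
      (fun e : String × List String =>
        match_any_loose (if company_name ≠ "" then PySem.Str.strip company_name else "") [e.1] ||
        match_any_loose (if company_identifier ≠ "" then PySem.Str.strip company_identifier else "") [e.1]) := by
    funext e; exact tier0_eq _ _ e.1
  have h1 : (fun e : String × List String =>
      decide (pvNorm (PySem.Str.join " | "
          [if company_name ≠ "" then PySem.Str.strip company_name else "",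
           if company_identifier ≠ "" then PySem.Str.strip company_identifier else ""]) ≠ "") &&
        ((e.1 :: e.2).any (fun p =>
          let p2 := pvNorm p; decide (p2 ≠ "") &&
            PySem.Str.isIn p2 (pvNorm (PySem.Str.join " | "
              [if company_name ≠ "" then PySem.Str.strip company_name else "",
               if company_identifier ≠ "" then PySem.Str.strip company_identifier else ""]))))) =
      (fun e : String × List String =>
        match_any_loose (PySem.Str.join " | "
          [if company_name ≠ "" then PySem.Str.strip company_name else "",
           if company_identifier ≠ "" then PySem.Str.strip company_identifier else ""]) (e.1 :: e.2)) := by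
    funext e; exact tier1_eq _ e.1 e.2
  rw [h0, h1]
  cases COMPANY_ALIASES.find? (fun e : String × List String =>
      match_any_loose (if company_name ≠ "" then PySem.Str.strip company_name else "") [e.1] ||
      match_any_loose (if company_identifier ≠ "" then PySem.Str.strip company_identifier else "") [e.1]) with
  | some e => rfl
  | none =>
    cases COMPANY_ALIASES.find? (fun e : String × List String =>
        match_any_loose (PySem.Str.join " | "
          [if company_name ≠ "" then PySem.Str.strip company_name else "",
           if company_identifier ≠ "" then PySem.Str.strip company_identifier else ""]) (e.1 :: e.2)) with
    | some e => rfl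
    | none => rfl
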